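-- pv_equiv track=rewrite | github.com/SVISHNUVARDHAN3610/Brain-Tumor-detection-using-VIT | main.py | get_sorted_class_names_and_frequencies
-- ===== SOURCE A (Python) =====
-- def get_sorted_class_names_and_frequencies(distribution, name_mapper):
--     labels = list(distribution.keys())
--     frequencies = list(distribution.values())
--
--     class_names = [name_mapper[label] for label in labels]
--
--     sorted_indices = sorted(range(len(class_names)), key=lambda i: class_names[i])
--     sorted_class_names = [class_names[i] for i in sorted_indices]
--     sorted_frequencies = [frequencies[i] for i in sorted_indices]
--
--     return sorted_class_names, sorted_frequencies
-- ===== SOURCE B (Python) =====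
-- def get_sorted_class_names_and_frequencies(distribution, name_mapper):
--     names, freqs = [], []
--     for label, freq in distribution.items():
--         name = name_mapper[label]
--         lo, hi = 0, len(names)
--         while lo < hi:
--             mid = (lo + hi) // 2
--             if name < names[mid]:
--                 hi = mid
--             else:
--                 lo = mid + 1
--         names.insert(lo, name)
--         freqs.insert(lo, freq)
--     return names, freqs
-- ===== Notes on version B (the rewrite author's own statement) =====
-- stated objective: alternative
-- what changed: B never calls sorted(): it makes one online pass over the dict, binary-searching (hand-written bisect_right) the insertion point in a pair of parallel lists kept sorted by name and inserting there, replacing A's argsort of index positions plus two gather passes; inserting after equal names preserves A's stable tie order.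
import Mathlib
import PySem

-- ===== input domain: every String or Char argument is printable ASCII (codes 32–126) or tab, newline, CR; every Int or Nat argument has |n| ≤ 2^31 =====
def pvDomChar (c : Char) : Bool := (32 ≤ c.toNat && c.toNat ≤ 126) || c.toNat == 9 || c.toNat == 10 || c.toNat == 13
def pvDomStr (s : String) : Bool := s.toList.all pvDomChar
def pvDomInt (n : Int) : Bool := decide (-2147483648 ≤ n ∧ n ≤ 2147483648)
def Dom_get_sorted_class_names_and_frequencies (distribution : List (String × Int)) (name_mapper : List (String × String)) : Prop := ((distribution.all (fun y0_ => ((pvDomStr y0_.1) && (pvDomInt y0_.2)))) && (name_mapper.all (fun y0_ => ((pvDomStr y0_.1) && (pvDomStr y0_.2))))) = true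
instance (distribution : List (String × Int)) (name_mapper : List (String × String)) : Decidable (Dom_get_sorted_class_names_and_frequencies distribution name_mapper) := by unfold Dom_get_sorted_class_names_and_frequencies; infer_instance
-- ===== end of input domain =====

-- B replaces A's sort of index positions + two gather passes by a single online pass that
-- binary-searches (hand-written bisect_right) the insertion point in two parallel lists kept
-- sorted by name; objective: alternative (no library sort call).

-- dict lookup name_mapper[label]: first matching key (Pre_ guarantees the key is present,
-- so the "" default is never used)
def pvLookup (m : List (String × String)) (k : String) : String :=
  ((m.find? (fun q => q.1 == k)).map Prod.snd).getD ""

-- ===== PORT A =====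
def get_sorted_class_names_and_frequencies (distribution : List (String × Int)) (name_mapper : List (String × String)) : List String × List Int :=
  let labels := distribution.map Prod.fst
  let frequencies := distribution.map Prod.snd
  let class_names := labels.map (fun label => pvLookup name_mapper label)
  let sorted_indices := PySem.List.sorted (PySem.List.pyRange 0 (class_names.length : Int) 1) (fun i => PySem.List.pyGetD class_names i "") false
  let sorted_class_names := sorted_indices.map (fun i => PySem.List.pyGetD class_names i "")
  let sorted_frequencies := sorted_indices.map (fun i => PySem.List.pyGetD frequencies i 0)
  (sorted_class_names, sorted_frequencies)

-- ===== PORT B =====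
-- the hand-written bisect_right while-loop of Source B, step for step
-- (lo and hi stay in 0..len(names), so Nat arithmetic and Nat division are exact here)
def pvBisect (names : List String) (name : String) (lo hi : Nat) : Nat :=
  if _h : lo < hi then
    let mid := (lo + hi) / 2
    if name < PySem.List.pyGetD names (mid : Int) "" then pvBisect names name lo mid
    else pvBisect names name (mid + 1) hi
  else lo
termination_by hi - lo
decreasing_by all_goals omega

def get_sorted_class_names_and_frequencies_alt (distribution : List (String × Int)) (name_mapper : List (String × String)) : List String × List Int :=
  distribution.foldl
    (fun (acc : List String × List Int) lf =>
      let name := pvLookup name_mapper lf.1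
      let lo := pvBisect acc.1 name 0 acc.1.length
      (PySem.List.insert acc.1 (lo : Int) name, PySem.List.insert acc.2 (lo : Int) lf.2))
    ([], [])

-- ===== PRECONDITION & SPEC =====
-- Pre_ excludes exactly the inputs where some distribution label is missing from
-- name_mapper: there the Python A raises KeyError (returns no value).
def Pre_get_sorted_class_names_and_frequencies (distribution : List (String × Int)) (name_mapper : List (String × String)) : Prop :=
  ∀ p ∈ distribution, ∃ q ∈ name_mapper, q.1 = p.1
instance (distribution : List (String × Int)) (name_mapper : List (String × String)) : Decidable (Pre_get_sorted_class_names_and_frequencies distribution name_mapper) := by unfold Pre_get_sorted_class_names_and_frequencies; infer_instance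

def pvWitness_get_sorted_class_names_and_frequencies : (List (String × Int)) × (List (String × String)) :=
  ([("b", 3), ("a", 1)], [("a", "Apple"), ("b", "Berry")])

def Spec_get_sorted_class_names_and_frequencies (distribution : List (String × Int)) (name_mapper : List (String × String)) (out : List String × List Int) : Prop := out = get_sorted_class_names_and_frequencies_alt distribution name_mapper
instance (distribution : List (String × Int)) (name_mapper : List (String × String)) (out : List String × List Int) : Decidable (Spec_get_sorted_class_names_and_frequencies distribution name_mapper out) := by unfold Spec_get_sorted_class_names_and_frequencies; infer_instance

-- ===== CLAIM (what is proved, stated in full; the proofs are below) =====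
def Claim_equal_get_sorted_class_names_and_frequencies : Prop := ∀ (distribution : List (String × Int)) (name_mapper : List (String × String)), Dom_get_sorted_class_names_and_frequencies distribution name_mapper → Pre_get_sorted_class_names_and_frequencies distribution name_mapper → Spec_get_sorted_class_names_and_frequencies distribution name_mapper (get_sorted_class_names_and_frequencies distribution name_mapper)

-- ===== LEMMAS AND PROOFS =====

-- ---------- A-side characterisation: A's output = (sorted pairs).map fst / .map snd ----------

-- inserting a mapped element into a mapped list, when the comparison only looks through the map
theorem pv_insertBy_map {α β κ : Type} [LT κ] [DecidableLT κ] (key : β → κ) (f : α → β) (x : α) (ys : List α) :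
    PySem.List.insertBy (fun a b => decide (key a < key b)) (f x) (ys.map f)
      = (PySem.List.insertBy (fun a b => decide (key (f a) < key (f b))) x ys).map f := by
  induction ys with
  | nil => simp [PySem.List.insertBy]
  | cons y t ih =>
      simp only [List.map_cons, PySem.List.insertBy]
      split_ifs with h
      · simp
      · simp [ih]

-- a stable sort of a mapped list is the map of the stable sort under the composed key
theorem pv_sorted_map {α β κ : Type} [LT κ] [DecidableLT κ] (f : α → β) (key : β → κ) (xs : List α) :
    PySem.List.sorted (xs.map f) key false
      = (PySem.List.sorted xs (fun x => key (f x)) false).map f := by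
  rw [PySem.List.sorted_eq_foldl_insertBy, PySem.List.sorted_eq_foldl_insertBy]
  suffices h : ∀ acc : List α,
      (xs.map f).foldl (fun acc x => PySem.List.insertBy (fun a b => decide (key a < key b)) x acc) (acc.map f)
        = (xs.foldl (fun acc x => PySem.List.insertBy (fun a b => decide (key (f a) < key (f b))) x acc) acc).map f by
    simpa using h []
  induction xs with
  | nil => intro acc; simp
  | cons x t ih =>
      intro acc
      simp only [List.map_cons, List.foldl_cons]
      rw [pv_insertBy_map key f x acc, ih]

-- reading every position of a pair list back through pyGetD reproduces the list
theorem pv_map_range_getD (ps : List (String × Int)) :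
    (PySem.List.pyRange 0 (ps.length : Int) 1).map
        (fun i => (PySem.List.pyGetD (ps.map Prod.fst) i "", PySem.List.pyGetD (ps.map Prod.snd) i 0)) = ps := by
  rw [PySem.List.pyRange_one]
  simp only [List.map_map, Function.comp_def, zero_add, sub_zero, Int.toNat_natCast,
    PySem.List.pyGetD_natCast]
  apply List.ext_getElem
  · simp
  · intro i h1 h2
    simp [List.getD_eq_getElem?_getD, List.getElem?_map, List.getElem?_eq_getElem h2]

-- A's sorted-index gather over the columns of L equals the sorted pair list
theorem pv_core (L : List (String × Int)) :
    PySem.List.sorted L (fun p => p.1) false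
      = (PySem.List.sorted (PySem.List.pyRange 0 ((L.map Prod.fst).length : Int) 1)
          (fun i => PySem.List.pyGetD (L.map Prod.fst) i "") false).map
          (fun i => (PySem.List.pyGetD (L.map Prod.fst) i "", PySem.List.pyGetD (L.map Prod.snd) i 0)) := by
  rw [List.length_map]
  conv_lhs => rw [← pv_map_range_getD L]
  rw [pv_sorted_map]

-- ---------- B-side: binary insertion step = stable insertBy ----------

-- insertBy inserts before the first element the new one must precede
theorem pv_insertBy_eq_takeWhile {α : Type} (before : α → α → Bool) (x : α) (L : List α) :
    PySem.List.insertBy before x L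
      = L.takeWhile (fun y => !(before x y)) ++ x :: L.dropWhile (fun y => !(before x y)) := by
  induction L with
  | nil => simp [PySem.List.insertBy]
  | cons y t ih =>
      simp only [PySem.List.insertBy, List.takeWhile_cons, List.dropWhile_cons]
      cases h : before x y <;> simp [ih]

-- length of takeWhile from boundary information
theorem pv_takeWhile_len {α : Type} (p : α → Bool) (N : List α) (k : Nat) (hk : k ≤ N.length)
    (h1 : ∀ j (hj : j < N.length), j < k → p N[j] = true)
    (h2 : ∀ j (hj : j < N.length), k ≤ j → p N[j] = false) :
    (N.takeWhile p).length = k := by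
  induction N generalizing k with
  | nil =>
      have : k = 0 := by simpa using hk
      subst this
      simp
  | cons a t ih =>
      cases k with
      | zero =>
          have := h2 0 (by simp) (by omega)
          simp at this
          simp [this]
      | succ k' =>
          have ha := h1 0 (by simp) (by omega)
          simp at ha
          simp only [List.takeWhile_cons, ha, if_true, List.length_cons]
          have := ih k' (by simpa using hk)
            (fun j hj hjk => h1 (j+1) (by simpa using Nat.succ_lt_succ hj) (by omega))
            (fun j hj hjk => h2 (j+1) (by simpa using Nat.succ_lt_succ hj) (by omega))
          omega

-- the hand-written bisect_right loop finds the stable insertion point in a sorted list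
theorem pv_bisect_eq (N : List String) (x : String) (hN : N.Pairwise (· ≤ ·)) :
    ∀ fuel lo hi, hi - lo ≤ fuel → lo ≤ hi → hi ≤ N.length →
    (∀ j (hj : j < N.length), j < lo → ¬ x < N[j]) →
    (∀ j (hj : j < N.length), hi ≤ j → x < N[j]) →
    pvBisect N x lo hi = (N.takeWhile (fun m => !decide (x < m))).length := by
  have hget : ∀ i j (hi : i < N.length) (hj : j < N.length), i ≤ j → N[i] ≤ N[j] := by
    intro i j hi hj hij
    rcases Nat.eq_or_lt_of_le hij with h | h
    · subst h; exact le_refl _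
    · exact List.pairwise_iff_getElem.mp hN i j hi hj h
  intro fuel
  induction fuel with
  | zero =>
      intro lo hi hfuel hlh hhl h1 h2
      have : lo = hi := by omega
      subst this
      rw [pvBisect]
      rw [dif_neg (lt_irrefl lo)]
      refine (pv_takeWhile_len _ N lo (by omega) ?_ ?_).symm
      · intro j hj hjk; simp [h1 j hj hjk]
      · intro j hj hjk; simp [h2 j hj hjk]
  | succ f ih =>
      intro lo hi hfuel hlh hhl h1 h2
      rw [pvBisect]
      by_cases hlt : lo < hi
      · rw [dif_pos hlt]
        have hmid1 : lo ≤ (lo + hi) / 2 := by omega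
        have hmid2 : (lo + hi) / 2 < hi := by omega
        have hmlen : (lo + hi) / 2 < N.length := by omega
        have hgetD : PySem.List.pyGetD N (((lo + hi) / 2 : Nat) : Int) "" = N[(lo + hi) / 2] := by
          rw [PySem.List.pyGetD_natCast]
          exact List.getD_eq_getElem _ _ hmlen
        by_cases hc : x < PySem.List.pyGetD N (((lo + hi) / 2 : Nat) : Int) ""
        · simp only [if_pos hc]
          apply ih lo ((lo + hi) / 2) (by omega) (by omega) (by omega) h1
          intro j hj hjk
          exact lt_of_lt_of_le (hgetD ▸ hc) (hget _ j hmlen hj hjk)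
        · simp only [if_neg hc]
          apply ih ((lo + hi) / 2 + 1) hi (by omega) (by omega) hhl
          · intro j hj hjk hcon
            have : N[(lo + hi) / 2] ≤ x := by
              rw [hgetD] at hc; exact le_of_not_gt hc
            have hjm : j ≤ (lo + hi) / 2 := by omega
            exact absurd (lt_of_lt_of_le hcon (le_trans (hget j _ hj hmlen hjm) this)) (lt_irrefl x)
          · exact h2
      · rw [dif_neg hlt]
        have hle : lo = hi := by omega
        subst hle
        refine (pv_takeWhile_len _ N lo (by omega) ?_ ?_).symm
        · intro j hj hjk; simp [h1 j hj hjk]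
        · intro j hj hjk; simp [h2 j hj hjk]

-- takeWhile/dropWhile of a mapped list as take/drop of the mapped columns
theorem pv_map_takeWhile_take {a b : Type} (p : a -> Bool) (f : a -> b) (l : List a) :
    (l.takeWhile p).map f = (l.map f).take (l.takeWhile p).length := by
  induction l with
  | nil => simp
  | cons x t ih => cases h : p x <;> simp [h, ih]

theorem pv_map_dropWhile_drop {a b : Type} (p : a -> Bool) (f : a -> b) (l : List a) :
    (l.dropWhile p).map f = (l.map f).drop (l.takeWhile p).length := by
  induction l with
  | nil => simp
  | cons x t ih => cases h : p x <;> simp [h, ih]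

-- one binary-insertion step on the columns of a sorted pair list = insertBy on the pair list
theorem pv_step (S : List (String × Int)) (name : String) (f : Int)
    (hS : S.Pairwise (fun a b => a.1 ≤ b.1)) :
    (PySem.List.insert (S.map Prod.fst)
        ((pvBisect (S.map Prod.fst) name 0 (S.map Prod.fst).length : Nat) : Int) name,
     PySem.List.insert (S.map Prod.snd)
        ((pvBisect (S.map Prod.fst) name 0 (S.map Prod.fst).length : Nat) : Int) f)
      = ((PySem.List.insertBy (fun a b => decide (a.1 < b.1)) (name, f) S).map Prod.fst,
         (PySem.List.insertBy (fun a b => decide (a.1 < b.1)) (name, f) S).map Prod.snd) := by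
  have hN : (S.map Prod.fst).Pairwise (· ≤ ·) := List.pairwise_map.mpr hS
  have hbis := pv_bisect_eq (S.map Prod.fst) name hN ((S.map Prod.fst).length) 0 (S.map Prod.fst).length
    (by omega) (by omega) (le_refl _)
    (fun j hj hjk => absurd hjk (by omega))
    (fun j hj hjk => absurd hj (by omega))
  set p : String → Bool := fun m => !decide (name < m) with hp
  set q : String × Int → Bool := fun y => !decide (name < y.1) with hq
  have htq : (S.map Prod.fst).takeWhile p = (S.takeWhile q).map Prod.fst := by
    rw [List.takeWhile_map]; rfl
  have hlq : ((S.map Prod.fst).takeWhile p).length = (S.takeWhile q).length := by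
    rw [htq, List.length_map]
  have hlen : ((S.map Prod.fst).takeWhile p).length ≤ (S.map Prod.fst).length :=
    (List.takeWhile_sublist p).length_le
  have hlen2 : ((S.map Prod.fst).takeWhile p).length ≤ (S.map Prod.snd).length := by
    simpa using hlen
  have hIB : PySem.List.insertBy (fun a b => decide (a.1 < b.1)) (name, f) S
      = S.takeWhile q ++ (name, f) :: S.dropWhile q := by
    have := pv_insertBy_eq_takeWhile (fun a b : String × Int => decide (a.1 < b.1)) (name, f) S
    simpa [hq] using this
  rw [hbis, PySem.List.insert_natCast _ _ _ hlen, PySem.List.insert_natCast _ _ _ hlen2, hIB]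
  simp only [Prod.mk.injEq, List.map_append, List.map_cons, hlq]
  constructor
  · rw [pv_map_takeWhile_take q Prod.fst S, pv_map_dropWhile_drop q Prod.fst S]
  · rw [pv_map_takeWhile_take q Prod.snd S, pv_map_dropWhile_drop q Prod.snd S]

-- B's fold equals the columns of the insertion sort of the pair list
theorem pv_fold (ps : List (String × Int)) :
    ps.foldl
        (fun (acc : List String × List Int) lf =>
          (PySem.List.insert acc.1 ((pvBisect acc.1 lf.1 0 acc.1.length : Nat) : Int) lf.1,
           PySem.List.insert acc.2 ((pvBisect acc.1 lf.1 0 acc.1.length : Nat) : Int) lf.2))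
        ([], [])
      = ((PySem.List.sorted ps (fun p => p.1) false).map Prod.fst,
         (PySem.List.sorted ps (fun p => p.1) false).map Prod.snd) := by
  induction ps using List.reverseRecOn with
  | nil => simp [PySem.List.sorted]
  | append_singleton t x ih =>
      rw [List.foldl_append, List.foldl_cons, List.foldl_nil, ih]
      have hS : (PySem.List.sorted t (fun p => p.1) false).Pairwise (fun a b => a.1 ≤ b.1) :=
        PySem.List.sorted_pairwise t (fun p => p.1)
      have hstep := pv_step (PySem.List.sorted t (fun p => p.1) false) x.1 x.2 hS
      simp only [List.length_map] at hstep ⊢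
      rw [hstep]
      have : PySem.List.sorted (t ++ [x]) (fun p => p.1) false
          = PySem.List.insertBy (fun a b => decide (a.1 < b.1)) x (PySem.List.sorted t (fun p => p.1) false) := by
        rw [PySem.List.sorted_eq_foldl_insertBy, PySem.List.sorted_eq_foldl_insertBy,
          List.foldl_append, List.foldl_cons, List.foldl_nil]
      rw [this]

-- the two programs agree
theorem get_sorted_agree (distribution : List (String × Int)) (name_mapper : List (String × String)) :
    get_sorted_class_names_and_frequencies distribution name_mapper
      = get_sorted_class_names_and_frequencies_alt distribution name_mapper := by
  unfold get_sorted_class_names_and_frequencies get_sorted_class_names_and_frequencies_alt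
  have hBfold :
      distribution.foldl
          (fun (acc : List String × List Int) lf =>
            let name := pvLookup name_mapper lf.1
            let lo := pvBisect acc.1 name 0 acc.1.length
            (PySem.List.insert acc.1 (lo : Int) name, PySem.List.insert acc.2 (lo : Int) lf.2))
          ([], [])
        = (distribution.map (fun lf => (pvLookup name_mapper lf.1, lf.2))).foldl
          (fun (acc : List String × List Int) lf =>
            (PySem.List.insert acc.1 ((pvBisect acc.1 lf.1 0 acc.1.length : Nat) : Int) lf.1,
             PySem.List.insert acc.2 ((pvBisect acc.1 lf.1 0 acc.1.length : Nat) : Int) lf.2)) ([], []) := by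
    rw [List.foldl_map]
  rw [hBfold, pv_fold]
  set L := distribution.map (fun lf => (pvLookup name_mapper lf.1, lf.2)) with hL
  have hcn : (distribution.map Prod.fst).map (fun label => pvLookup name_mapper label)
      = L.map Prod.fst := by
    simp [hL, List.map_map, Function.comp_def]
  have hfr : distribution.map Prod.snd = L.map Prod.snd := by
    simp [hL, List.map_map, Function.comp_def]
  simp only [hcn, hfr]
  rw [pv_core L]
  simp [List.map_map, Function.comp_def]

-- ===== VERDICT (by name: the statement is the Claim_ definition above) =====
theorem get_sorted_class_names_and_frequencies_spec : Claim_equal_get_sorted_class_names_and_frequencies := by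
  intro distribution name_mapper _ _
  unfold Spec_get_sorted_class_names_and_frequencies
  exact get_sorted_agree distribution name_mapper
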